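-- pv_equiv track=rewrite | github.com/kmuinfosec/RAID_v2 | RaidUtils/Payload.py | AE2
-- ===== SOURCE A (Python) =====
-- def AE2(_str, window_size):
--     bytes_len = len(_str)
--     chunk_bytes_list = []
--     byte_idx = 0
--     byte_arr = []
--     while byte_idx < bytes_len:
--         max_value = int(_str[byte_idx:byte_idx+2], 16)
--         max_position = byte_idx
--         byte_arr.append(_str[byte_idx:byte_idx+2])
--         byte_idx += 2
--         while byte_idx < bytes_len:
--             if int(_str[byte_idx:byte_idx+2], 16) <= max_value:
--                 if byte_idx == max_position + 2 * window_size: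
--                     byte_arr.append(_str[byte_idx:byte_idx+2])
--                     content_bytes = "".join(byte_arr)
--                     chunk_bytes_list.append(content_bytes)
--                     byte_arr = []
--                     byte_idx += 2
--                     break
--             else:
--                 max_value = int(_str[byte_idx:byte_idx+2], 16)
--                 max_position = byte_idx
--             byte_arr.append(_str[byte_idx:byte_idx+2])
--             byte_idx += 2
--     if len(byte_arr):
--         content_bytes = "".join(byte_arr)
--         chunk_bytes_list.append(content_bytes)
--     return chunk_bytes_list
-- ===== SOURCE B (Python) =====
-- def AE2(_str, window_size):
--     n = len(_str)
--     # pass 1: one flattened scan finding cut end-indices (AE running maximum)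
--     cuts = []
--     i = 0
--     state = None  # None = at chunk start; else (max_value, max_position)
--     while i < n:
--         v = int(_str[i:i+2], 16)
--         if state is None or v > state[0]:
--             state = (v, i)
--         elif i == state[1] + 2 * window_size:
--             cuts.append(i + 2)
--             state = None
--         i += 2
--     # pass 2: slice the string at the recorded boundaries
--     out = []
--     start = 0
--     for c in cuts:
--         out.append(_str[start:c])
--         start = c
--     if start < n:
--         out.append(_str[start:])
--     return out
-- ===== Notes on version B (the rewrite author's own statement) =====
-- stated objective: alternative
-- what changed: Replaces A's nested outer/inner loops that accumulate per-chunk byte lists and join them with a single flattened boundary scan (running-maximum state as an Option) that only records cut indices, followed by a separate pass slicing the string at those boundaries.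
import Mathlib
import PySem

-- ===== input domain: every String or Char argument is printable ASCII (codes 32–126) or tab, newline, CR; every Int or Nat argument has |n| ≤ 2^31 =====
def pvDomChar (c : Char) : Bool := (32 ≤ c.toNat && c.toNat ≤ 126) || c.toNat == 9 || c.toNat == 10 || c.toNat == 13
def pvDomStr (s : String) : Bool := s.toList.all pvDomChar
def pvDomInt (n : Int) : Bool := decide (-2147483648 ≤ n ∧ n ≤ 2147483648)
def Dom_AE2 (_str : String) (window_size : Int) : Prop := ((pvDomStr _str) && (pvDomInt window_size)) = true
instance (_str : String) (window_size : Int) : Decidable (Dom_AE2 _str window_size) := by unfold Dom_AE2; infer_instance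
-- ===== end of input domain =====

-- B replaces A's accumulate-windows-and-join-per-chunk loop nest by one flattened boundary
-- scan that records cut indices, followed by a separate slicing pass (objective: alternative).

-- Shared helper: Python's int(x, 16) for the 1- and 2-character slices both programs take
-- (exact on the ASCII domain incl. whitespace/sign handling; hand-ported, PySem has no base-16 parse).
def pvHexDig? (c : Char) : Option Int :=
  if '0' ≤ c ∧ c ≤ '9' then some ((c.toNat : Int) - 48)
  else if 'a' ≤ c ∧ c ≤ 'f' then some ((c.toNat : Int) - 87)
  else if 'A' ≤ c ∧ c ≤ 'F' then some ((c.toNat : Int) - 55)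
  else none

def pvWs (c : Char) : Bool := c == ' ' || c == '\t' || c == '\n' || c == '\r'

def pvInt16? : List Char → Option Int
  | [c] => pvHexDig? c
  | [a, b] =>
    if pvWs a then pvHexDig? b
    else if pvWs b then pvHexDig? a
    else if a == '+' then pvHexDig? b
    else if a == '-' then (pvHexDig? b).map Int.neg
    else match pvHexDig? a, pvHexDig? b with
      | some x, some y => some (16 * x + y)
      | _, _ => none
  | _ => none

-- _str[i:i+2] for 0 ≤ i (exact: nonnegative in-order slice = drop-then-take)
def pvWin (cs : List Char) (i : Nat) : List Char := (cs.drop i).take 2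

-- int(_str[i:i+2], 16); Pre_AE2 guarantees isSome, the default is never read inside Pre_
def pvHexAt (cs : List Char) (i : Nat) : Int := (pvInt16? (pvWin cs i)).getD 0

-- ===== PORT A ===== (outer while / inner while of Source A; byte_idx = i, byte_arr = arr,
-- chunk_bytes_list = acc; the trailing `if len(byte_arr)` is the inner loop's exhaustion exit)
mutual
def pvOuterA (cs : List Char) (n : Nat) (w : Int) (i : Nat) (acc : List String) : List String :=
  if _h : i < n then
    pvInnerA cs n w (i + 2) (pvHexAt cs i) i [pvWin cs i] acc
  else acc
  termination_by n - i
  decreasing_by all_goals omega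
def pvInnerA (cs : List Char) (n : Nat) (w : Int) (i : Nat) (mv : Int) (mp : Nat)
    (arr : List (List Char)) (acc : List String) : List String :=
  if _h : i < n then
    if pvHexAt cs i ≤ mv then
      if (i : Int) = (mp : Int) + 2 * w then
        pvOuterA cs n w (i + 2) (acc ++ [String.ofList (arr ++ [pvWin cs i]).flatten])
      else pvInnerA cs n w (i + 2) mv mp (arr ++ [pvWin cs i]) acc
    else pvInnerA cs n w (i + 2) (pvHexAt cs i) i (arr ++ [pvWin cs i]) acc
  else acc ++ (if arr.length ≠ 0 then [String.ofList arr.flatten] else [])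
  termination_by n - i
  decreasing_by all_goals omega
end

def AE2 (_str : String) (window_size : Int) : List String :=
  pvOuterA _str.toList _str.toList.length window_size 0 []

-- ===== PORT B ===== (Source B: pass 1 = flattened boundary scan, pass 2 = slicing loop)
def pvScanB (cs : List Char) (n : Nat) (w : Int) (i : Nat) (st : Option (Int × Nat))
    (cuts : List Nat) : List Nat :=
  if _h : i < n then
    match st with
    | none => pvScanB cs n w (i + 2) (some (pvHexAt cs i, i)) cuts
    | some (mv, mp) =>
      if pvHexAt cs i > mv then pvScanB cs n w (i + 2) (some (pvHexAt cs i, i)) cuts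
      else if (i : Int) = (mp : Int) + 2 * w then pvScanB cs n w (i + 2) none (cuts ++ [i + 2])
      else pvScanB cs n w (i + 2) (some (mv, mp)) cuts
  else cuts
termination_by n - i
decreasing_by all_goals omega

def pvEmitB (cs : List Char) (n : Nat) : List Nat → Nat → List String
  | [], start => if start < n then [String.ofList ((cs.drop start).take (n - start))] else []
  | c :: rest, start => String.ofList ((cs.drop start).take (c - start)) :: pvEmitB cs n rest c

def AE2_alt (_str : String) (window_size : Int) : List String :=
  pvEmitB _str.toList _str.toList.length
    (pvScanB _str.toList _str.toList.length window_size 0 none []) 0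

-- ===== PRECONDITION & SPEC =====
-- Pre_ excludes exactly the inputs where Python's int(_str[i:i+2], 16) raises ValueError
-- (a 2-char window at an even index that is not a valid base-16 literal): A raises there.
def Pre_AE2 (_str : String) (window_size : Int) : Prop :=
  ∀ i, i < _str.toList.length → i % 2 = 0 → (pvInt16? (pvWin _str.toList i)).isSome = true
instance (_str : String) (window_size : Int) : Decidable (Pre_AE2 _str window_size) := by
  unfold Pre_AE2; infer_instance
def pvWitness_AE2 : String × Int := ("abc4f0012345", 2)
def Spec_AE2 (_str : String) (window_size : Int) (out : List String) : Prop := out = AE2_alt _str window_size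
instance (_str : String) (window_size : Int) (out : List String) : Decidable (Spec_AE2 _str window_size out) := by unfold Spec_AE2; infer_instance

-- ===== CLAIM (what is proved, stated in full; the proofs are below) =====
def Claim_equal_AE2 : Prop := ∀ (_str : String) (window_size : Int), Dom_AE2 _str window_size → Pre_AE2 _str window_size → Spec_AE2 _str window_size (AE2 _str window_size)

-- ===== LEMMAS AND PROOFS =====

-- step equations of B's scan (one per branch; pvScanB is well-founded, so rw needs these)
lemma pvScanB_stop (cs : List Char) (n : Nat) (w : Int) (i : Nat) (st : Option (Int × Nat))
    (cuts : List Nat) (h : ¬ i < n) : pvScanB cs n w i st cuts = cuts := by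
  conv_lhs => rw [pvScanB.eq_def]
  simp [h]

lemma pvScanB_none (cs : List Char) (n : Nat) (w : Int) (i : Nat) (cuts : List Nat)
    (h : i < n) :
    pvScanB cs n w i none cuts = pvScanB cs n w (i + 2) (some (pvHexAt cs i, i)) cuts := by
  conv_lhs => rw [pvScanB.eq_def]
  simp [h]

lemma pvScanB_gt (cs : List Char) (n : Nat) (w : Int) (i : Nat) (mv : Int) (mp : Nat)
    (cuts : List Nat) (h : i < n) (h1 : pvHexAt cs i > mv) :
    pvScanB cs n w i (some (mv, mp)) cuts = pvScanB cs n w (i + 2) (some (pvHexAt cs i, i)) cuts := by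
  conv_lhs => rw [pvScanB.eq_def]
  simp [h, h1]

lemma pvScanB_cut (cs : List Char) (n : Nat) (w : Int) (i : Nat) (mv : Int) (mp : Nat)
    (cuts : List Nat) (h : i < n) (h1 : ¬ pvHexAt cs i > mv) (h2 : (i : Int) = (mp : Int) + 2 * w) :
    pvScanB cs n w i (some (mv, mp)) cuts = pvScanB cs n w (i + 2) none (cuts ++ [i + 2]) := by
  conv_lhs => rw [pvScanB.eq_def]
  simp [h, h1, h2]

lemma pvScanB_keep (cs : List Char) (n : Nat) (w : Int) (i : Nat) (mv : Int) (mp : Nat)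
    (cuts : List Nat) (h : i < n) (h1 : ¬ pvHexAt cs i > mv)
    (h2 : ¬ (i : Int) = (mp : Int) + 2 * w) :
    pvScanB cs n w i (some (mv, mp)) cuts = pvScanB cs n w (i + 2) (some (mv, mp)) cuts := by
  conv_lhs => rw [pvScanB.eq_def]
  simp [h, h1, h2]

-- the cuts accumulator of B's scan is pure append
lemma pvScanB_append (cs : List Char) (n : Nat) (w : Int) :
    ∀ d i st cuts, n - i ≤ d →
      pvScanB cs n w i st cuts = cuts ++ pvScanB cs n w i st [] := by
  intro d
  induction d with
  | zero =>
    intro i st cuts hd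
    have h : ¬ i < n := by omega
    rw [pvScanB_stop cs n w i st cuts h, pvScanB_stop cs n w i st [] h, List.append_nil]
  | succ d ih =>
    intro i st cuts hd
    by_cases h : i < n
    · match st with
      | none =>
        rw [pvScanB_none cs n w i cuts h, pvScanB_none cs n w i [] h]
        exact ih (i + 2) _ cuts (by omega)
      | some (mv, mp) =>
        by_cases h1 : pvHexAt cs i > mv
        · rw [pvScanB_gt cs n w i mv mp cuts h h1, pvScanB_gt cs n w i mv mp [] h h1]
          exact ih (i + 2) _ cuts (by omega)
        · by_cases h2 : (i : Int) = (mp : Int) + 2 * w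
          · rw [pvScanB_cut cs n w i mv mp cuts h h1 h2, pvScanB_cut cs n w i mv mp [] h h1 h2,
              ih (i + 2) none (cuts ++ [i + 2]) (by omega),
              ih (i + 2) none ([] ++ [i + 2]) (by omega)]
            simp
          · rw [pvScanB_keep cs n w i mv mp cuts h h1 h2, pvScanB_keep cs n w i mv mp [] h h1 h2]
            exact ih (i + 2) _ cuts (by omega)
    · rw [pvScanB_stop cs n w i st cuts h, pvScanB_stop cs n w i st [] h, List.append_nil]

-- appending the next 2-char window extends the chunk slice
lemma pvChunk_snoc (cs : List Char) (start i : Nat) (h : start ≤ i) :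
    (cs.drop start).take (i - start) ++ pvWin cs i = (cs.drop start).take (i + 2 - start) := by
  have h2 : i + 2 - start = (i - start) + 2 := by omega
  rw [h2, List.take_add, pvWin, List.drop_drop, Nat.add_sub_cancel' h]

-- main invariant: A's two loops against B's scan-then-slice pipeline
lemma pvMain (cs : List Char) (n : Nat) (w : Int) (hn : n = cs.length) :
    ∀ d i, n - i ≤ d →
      ((∀ acc, pvOuterA cs n w i acc = acc ++ pvEmitB cs n (pvScanB cs n w i none []) i) ∧
       (∀ mv mp arr acc start, start < n → start ≤ mp → mp < i →
          arr.flatten = (cs.drop start).take (i - start) → arr ≠ [] →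
          pvInnerA cs n w i mv mp arr acc =
            acc ++ pvEmitB cs n (pvScanB cs n w i (some (mv, mp)) []) start)) := by
  intro d
  induction d with
  | zero =>
    intro i hd
    have hni : ¬ i < n := by omega
    constructor
    · intro acc
      rw [pvOuterA, pvScanB_stop cs n w i none [] hni]
      simp [hni, pvEmitB]
    · intro mv mp arr acc start hs _ _ harr hne
      rw [pvInnerA, pvScanB_stop cs n w i (some (mv, mp)) [] hni]
      have hlen : arr.length ≠ 0 := fun h0 => hne (List.eq_nil_of_length_eq_zero h0)
      have htake : (cs.drop start).take (i - start) = (cs.drop start).take (n - start) := by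
        rw [List.take_of_length_le (by rw [List.length_drop, ← hn]; omega),
            List.take_of_length_le (by rw [List.length_drop, ← hn])]
      simp [hni, pvEmitB, hs, hlen, harr, htake]
  | succ d ih =>
    intro i hd
    constructor
    · -- outer loop step
      intro acc
      rw [pvOuterA]
      by_cases h : i < n
      · simp only [h, dif_pos]
        rw [pvScanB_none cs n w i [] h]
        have hwin : pvWin cs i ≠ [] := by
          have hdne : (cs.drop i) ≠ [] := by
            intro he
            have := List.drop_eq_nil_iff.mp he
            omega
          simp [pvWin, List.take_eq_nil_iff, hdne]
        exact (ih (i + 2) (by omega)).2 (pvHexAt cs i) i [pvWin cs i] acc i h (le_refl i)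
          (by omega) (by simp [pvWin]) (by simp)
      · rw [pvScanB_stop cs n w i none [] h]
        simp [h, pvEmitB]
    · -- inner loop step
      intro mv mp arr acc start hs hsm hmi harr hne
      rw [pvInnerA]
      have hflat : (arr ++ [pvWin cs i]).flatten = (cs.drop start).take (i + 2 - start) := by
        rw [List.flatten_append, List.flatten_cons, List.flatten_nil, List.append_nil,
          harr, pvChunk_snoc cs start i (by omega)]
      by_cases h : i < n
      · simp only [h, dif_pos]
        by_cases h1 : pvHexAt cs i ≤ mv
        · have h1' : ¬ pvHexAt cs i > mv := by omega
          simp only [h1, if_pos]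
          by_cases h2 : (i : Int) = (mp : Int) + 2 * w
          · simp only [h2, if_pos]
            rw [pvScanB_cut cs n w i mv mp [] h h1' h2,
              pvScanB_append cs n w (d + 1) (i + 2) none ([] ++ [i + 2]) (by omega)]
            simp only [List.nil_append]
            rw [(ih (i + 2) (by omega)).1, hflat]
            simp [pvEmitB]
          · simp only [h2, if_false]
            rw [pvScanB_keep cs n w i mv mp [] h h1' h2]
            exact (ih (i + 2) (by omega)).2 mv mp (arr ++ [pvWin cs i]) acc start hs hsm
              (by omega) hflat (by simp)
        · have h1' : pvHexAt cs i > mv := by omega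
          simp only [h1, if_false]
          rw [pvScanB_gt cs n w i mv mp [] h h1']
          exact (ih (i + 2) (by omega)).2 (pvHexAt cs i) i (arr ++ [pvWin cs i]) acc start hs
            (by omega) (by omega) hflat (by simp)
      · simp only [h, dif_neg, not_false_iff]
        rw [pvScanB_stop cs n w i (some (mv, mp)) [] h]
        have hlen : arr.length ≠ 0 := fun h0 => hne (List.eq_nil_of_length_eq_zero h0)
        have htake : (cs.drop start).take (i - start) = (cs.drop start).take (n - start) := by
          rw [List.take_of_length_le (by rw [List.length_drop, ← hn]; omega),
              List.take_of_length_le (by rw [List.length_drop, ← hn])]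
        simp [pvEmitB, hs, hlen, harr, htake]

-- ===== VERDICT (by name: the statement is the Claim_ definition above) =====
theorem AE2_spec : Claim_equal_AE2 := by
  intro _str window_size _hdom _hpre
  unfold Spec_AE2 AE2 AE2_alt
  rw [(pvMain _str.toList _str.toList.length window_size rfl _str.toList.length 0 (by omega)).1 []]
  simp
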